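-- pv_equiv track=rewrite | github.com/yeoyeong/Algorithm | 백준/Silver/25192. 인사성 밝은 곰곰이/인사성 밝은 곰곰이.py | count_gomgom_mentions
-- ===== SOURCE A (Python) =====
-- def count_gomgom_mentions(records):
--     gomgom_count = 0
--     current_users = set() #중복 허용 x
--     for record in records:
--         if record == "ENTER":
--             current_users.clear()
--         else:
--             if record not in current_users:
--                 current_users.add(record)
--                 gomgom_count += 1
--
--     return gomgom_count
-- ===== SOURCE B (Python) =====
-- def count_gomgom_mentions(records):
--     # Group records into ENTER-delimited session segments, then sum distinct counts.
--     segments = []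
--     current = []
--     for r in records:
--         if r == "ENTER":
--             segments.append(current)
--             current = []
--         else:
--             current.append(r)
--     segments.append(current)
--     return sum(len(set(seg)) for seg in segments)
-- ===== Notes on version B (the rewrite author's own statement) =====
-- stated objective: alternative
-- what changed: Replaces the running cleared-set with explicit grouping: one pass splits the records into ENTER-delimited segments, a second pass sums the number of distinct records per segment.
import Mathlib
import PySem

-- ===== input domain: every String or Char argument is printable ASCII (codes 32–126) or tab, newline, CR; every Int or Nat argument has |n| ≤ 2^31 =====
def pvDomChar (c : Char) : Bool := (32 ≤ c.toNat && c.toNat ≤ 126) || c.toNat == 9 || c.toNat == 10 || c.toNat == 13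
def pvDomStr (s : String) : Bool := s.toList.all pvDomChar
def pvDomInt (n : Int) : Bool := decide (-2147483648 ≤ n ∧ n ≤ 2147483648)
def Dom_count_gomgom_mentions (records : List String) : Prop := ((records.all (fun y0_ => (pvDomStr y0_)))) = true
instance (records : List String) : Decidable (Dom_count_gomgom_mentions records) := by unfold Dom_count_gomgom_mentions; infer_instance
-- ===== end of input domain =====

-- B replaces A's running cleared-set with explicit grouping into ENTER-delimited
-- segments followed by summing distinct counts per segment (alternative decomposition).


-- ===== PORT A =====
def count_gomgom_mentions (records : List String) : Int :=
  (records.foldl (fun (st : Int × PySem.Set String) record =>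
      if record == "ENTER" then (st.1, PySem.Set.empty)
      else if ¬ PySem.Set.contains st.2 record then (st.1 + 1, PySem.Set.add st.2 record)
      else st)
    (0, PySem.Set.empty)).1

-- ===== PORT B =====
def count_gomgom_mentions_alt (records : List String) : Int :=
  let st := records.foldl (fun (st : List (List String) × List String) r =>
      if r == "ENTER" then (st.1 ++ [st.2], ([] : List String))
      else (st.1, st.2 ++ [r])) ([], [])
  let segments := st.1 ++ [st.2]
  (segments.map (fun seg => ((PySem.Set.ofList seg).length : Int))).sum

-- ===== PRECONDITION & SPEC =====
def Spec_count_gomgom_mentions (records : List String) (out : Int) : Prop := out = count_gomgom_mentions_alt records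
instance (records : List String) (out : Int) : Decidable (Spec_count_gomgom_mentions records out) := by unfold Spec_count_gomgom_mentions; infer_instance

-- ===== CLAIM (what is proved, stated in full; the proofs are below) =====
def Claim_equal_count_gomgom_mentions : Prop := ∀ (records : List String), Dom_count_gomgom_mentions records → Spec_count_gomgom_mentions records (count_gomgom_mentions records)

-- ===== LEMMAS AND PROOFS =====

def pvSumD (segs : List (List String)) : Int :=
  (segs.map (fun seg => ((PySem.Set.ofList seg).length : Int))).sum

theorem pv_main (rs : List String) (segs : List (List String)) (cur : List String) :
    (rs.foldl (fun (st : Int × PySem.Set String) record =>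
        if record == "ENTER" then (st.1, PySem.Set.empty)
        else if ¬ PySem.Set.contains st.2 record then (st.1 + 1, PySem.Set.add st.2 record)
        else st)
      (pvSumD segs + ((PySem.Set.ofList cur).length : Int), PySem.Set.ofList cur)).1
    = pvSumD ((rs.foldl (fun (st : List (List String) × List String) r =>
        if r == "ENTER" then (st.1 ++ [st.2], ([] : List String))
        else (st.1, st.2 ++ [r])) (segs, cur)).1
        ++ [(rs.foldl (fun (st : List (List String) × List String) r =>
        if r == "ENTER" then (st.1 ++ [st.2], ([] : List String))
        else (st.1, st.2 ++ [r])) (segs, cur)).2]) := by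
  induction rs generalizing segs cur with
  | nil =>
    simp [pvSumD]
  | cons r rs ih =>
    by_cases hE : r = "ENTER"
    · subst hE
      simp only [List.foldl_cons, beq_self_eq_true, if_true]
      have h := ih (segs ++ [cur]) []
      have h2 : pvSumD (segs ++ [cur]) + ((PySem.Set.ofList ([] : List String)).length : Int)
          = pvSumD segs + ((PySem.Set.ofList cur).length : Int) := by
        simp [pvSumD]
      rw [h2] at h
      exact h
    · have hb : (r == "ENTER") = false := by simp [hE]
      simp only [List.foldl_cons, hb, if_false, Bool.false_eq_true]
      by_cases hm : r ∈ cur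
      · have hmem : r ∈ PySem.Set.ofList cur := (PySem.Set.mem_ofList _ _).mpr hm
        have hc : PySem.Set.contains (PySem.Set.ofList cur) r = true :=
          (PySem.Set.contains_iff _ _).mpr hmem
        have h2 : PySem.Set.ofList (cur ++ [r]) = PySem.Set.ofList cur := by
          rw [PySem.Set.ofList_append_singleton, PySem.Set.add_of_mem hmem]
        simp only [hc, not_true_eq_false, if_false]
        have h := ih segs (cur ++ [r])
        rw [h2] at h
        exact h
      · have hmem : r ∉ PySem.Set.ofList cur := fun hx => hm ((PySem.Set.mem_ofList _ _).mp hx)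
        have hc : PySem.Set.contains (PySem.Set.ofList cur) r = false := by
          by_contra hx
          exact hmem ((PySem.Set.contains_iff _ _).mp (by simpa using hx))
        have h2 : PySem.Set.ofList (cur ++ [r]) = PySem.Set.ofList cur ++ [r] := by
          rw [PySem.Set.ofList_append_singleton, PySem.Set.add_of_not_mem hmem]
        simp only [hc, Bool.false_eq_true, not_false_eq_true, if_true]
        rw [PySem.Set.add_of_not_mem hmem]
        have h := ih segs (cur ++ [r])
        rw [h2] at h
        have harr : pvSumD segs + (((PySem.Set.ofList cur ++ [r]).length : Int))
            = pvSumD segs + ((PySem.Set.ofList cur).length : Int) + 1 := by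
          simp; ring
        rw [harr] at h
        exact h

-- ===== VERDICT (by name: the statement is the Claim_ definition above) =====
theorem count_gomgom_mentions_spec : Claim_equal_count_gomgom_mentions := by
  intro records _
  unfold Spec_count_gomgom_mentions count_gomgom_mentions count_gomgom_mentions_alt
  have := pv_main records [] []
  simpa [pvSumD] using this
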